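-- pv_equiv track=rewrite | github.com/tormobr/advent_of_code_2018 | day02/solution.py | part1
-- ===== SOURCE A (Python) =====
-- def part1(data):
--     doubles = 0
--     tripples = 0
--
--     for line in data:
--         letters = [c for c in line]
--         for c in letters:
--             if letters.count(c) == 2:
--                 doubles += 1
--                 break
--         for c in letters:
--             if letters.count(c) == 3:
--                 tripples += 1
--                 break
--
--     return doubles * tripples
-- ===== SOURCE B (Python) =====
-- def part1(data):
--     doubles = 0
--     tripples = 0
--     for line in data:
--         s = sorted(line)
--         lengths = set()
--         i = 0
--         n = len(s)
--         while i < n: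
--             j = i
--             while j < n and s[j] == s[i]:
--                 j += 1
--             lengths.add(j - i)
--             i = j
--         if 2 in lengths:
--             doubles += 1
--         if 3 in lengths:
--             tripples += 1
--     return doubles * tripples
-- ===== Notes on version B (the rewrite author's own statement) =====
-- stated objective: alternative
-- what changed: Per line, instead of calling list.count inside two scan-with-break loops, B sorts the line once and scans the sorted list collecting the set of run lengths, then tests 2 and 3 against that set.
import Mathlib
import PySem

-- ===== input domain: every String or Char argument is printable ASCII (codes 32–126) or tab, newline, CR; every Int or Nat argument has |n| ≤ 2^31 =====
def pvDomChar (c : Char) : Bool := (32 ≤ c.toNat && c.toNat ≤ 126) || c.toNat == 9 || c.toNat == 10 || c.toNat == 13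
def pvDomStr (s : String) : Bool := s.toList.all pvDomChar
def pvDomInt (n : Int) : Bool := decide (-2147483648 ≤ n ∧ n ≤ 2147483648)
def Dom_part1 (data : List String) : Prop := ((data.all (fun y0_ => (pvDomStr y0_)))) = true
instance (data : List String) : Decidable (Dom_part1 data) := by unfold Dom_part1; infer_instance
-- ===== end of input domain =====

-- B sorts each line once and collects the set of run lengths instead of A's two scan-with-break loops over list.count.

-- ===== PORT A =====
-- the 'for c in letters: if letters.count(c) == n: …; break' loop: true iff it breaks
def pvScanCount (letters : List Char) (n : Nat) : List Char → Bool
  | [] => false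
  | c :: rest => if letters.count c == n then true else pvScanCount letters n rest

def part1 (data : List String) : Int :=
  let st := data.foldl (fun (st : Int × Int) line =>
    let letters := line.toList
    let d := if pvScanCount letters 2 letters then st.1 + 1 else st.1
    let t := if pvScanCount letters 3 letters then st.2 + 1 else st.2
    (d, t)) (0, 0)
  st.1 * st.2

-- ===== PORT B =====
-- run lengths of maximal blocks of equal adjacent characters (B's inner while-loop scan)
def pvRunLens : List Char → List Nat
  | [] => []
  | c :: t => ((t.takeWhile (· = c)).length + 1) :: pvRunLens (t.dropWhile (· = c))
termination_by l => l.length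
decreasing_by simp only [List.length_cons]; exact Nat.lt_succ_of_le (t.length_dropWhile_le _)

def part1_alt (data : List String) : Int :=
  let st := data.foldl (fun (st : Int × Int) line =>
    let s := PySem.List.sorted line.toList (fun x => x) false
    let lengths := PySem.Set.ofList (pvRunLens s)
    (st.1 + (if 2 ∈ lengths then 1 else 0), st.2 + (if 3 ∈ lengths then 1 else 0))) (0, 0)
  st.1 * st.2

-- ===== PRECONDITION & SPEC =====
def Spec_part1 (data : List String) (out : Int) : Prop := out = part1_alt data
instance (data : List String) (out : Int) : Decidable (Spec_part1 data out) := by unfold Spec_part1; infer_instance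

-- ===== CLAIM (what is proved, stated in full; the proofs are below) =====
def Claim_equal_part1 : Prop := ∀ (data : List String), Dom_part1 data → Spec_part1 data (part1 data)

-- ===== LEMMAS AND PROOFS =====

-- A's break-loop is an existence test
theorem pvScanCount_eq_any (letters : List Char) (n : Nat) (l : List Char) :
    pvScanCount letters n l = l.any (fun c => letters.count c == n) := by
  induction l with
  | nil => rfl
  | cons c rest ih =>
      simp only [pvScanCount, List.any_cons]
      by_cases h : letters.count c == n <;> simp [h, ih]

-- run lengths of a sorted list are exactly the counts of its members
theorem mem_pvRunLens_sorted (s : List Char) (hs : s.Pairwise (· ≤ ·)) (k : Nat) :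
    k ∈ pvRunLens s ↔ ∃ c ∈ s, s.count c = k := by
  induction s using pvRunLens.induct with
  | case1 => simp [pvRunLens]
  | case2 c t ih =>
      have hsplit : t.takeWhile (· = c) ++ t.dropWhile (· = c) = t := List.takeWhile_append_dropWhile
      have htake : ∀ x ∈ t.takeWhile (· = c), x = c := by
        intro x hx
        simpa using List.mem_takeWhile_imp hx
      have hpt : t.Pairwise (· ≤ ·) := (List.pairwise_cons.mp hs).2
      have hdropSub : (t.dropWhile (· = c)).Sublist t := List.dropWhile_sublist _
      have hpd : (t.dropWhile (· = c)).Pairwise (· ≤ ·) := hpt.sublist hdropSub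
      -- every element of the drop part differs from c
      have hdropne : ∀ x ∈ t.dropWhile (· = c), x ≠ c := by
        intro x hx
        cases hd : t.dropWhile (· = c) with
        | nil => simp [hd] at hx
        | cons h0 rest =>
            have hh0 : ¬ (h0 = c) := by
              have := List.head?_dropWhile_not (fun x => decide (x = c)) t
              simp [hd] at this
              simpa using this
            have hh0c : c ≤ h0 := by
              have hmem : h0 ∈ t := hdropSub.mem (by simp [hd])
              exact (List.pairwise_cons.mp hs).1 h0 hmem
            have hclt : c < h0 := lt_of_le_of_ne hh0c (fun h => hh0 h.symm)
            rw [hd] at hx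
            rcases List.mem_cons.mp hx with rfl | hx'
            · exact ne_of_gt hclt
            · have hle : h0 ≤ x := by
                have := List.pairwise_cons.mp (hd ▸ hpd)
                exact this.1 x hx'
              exact ne_of_gt (lt_of_lt_of_le hclt hle)
      -- count of c in the whole list is the first run length
      have h1 : (t.takeWhile (· = c)).count c = (t.takeWhile (· = c)).length :=
        List.count_eq_length.mpr (fun x hx => ((htake x hx).symm ▸ rfl))
      have h2 : (t.dropWhile (· = c)).count c = 0 :=
        List.count_eq_zero.mpr (fun hx => hdropne c hx rfl)
      have hcountc : (c :: t).count c = (t.takeWhile (· = c)).length + 1 := by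
        rw [List.count_cons_self]
        conv_lhs => rw [← hsplit]
        rw [List.count_append]
        omega
      -- counts of non-c elements are untouched by removing the run
      have hcount_ne : ∀ x, x ≠ c → (c :: t).count x = (t.dropWhile (· = c)).count x := by
        intro x hx
        have h3 : (t.takeWhile (· = c)).count x = 0 :=
          List.count_eq_zero.mpr (fun hmem => hx (htake x hmem))
        have h4 : (c :: t).count x = t.count x := by
          simp [List.count_cons]; exact fun h => hx h.symm
        rw [h4]
        conv_lhs => rw [← hsplit]
        rw [List.count_append]
        omega
      rw [pvRunLens]
      constructor
      · intro hk
        rcases List.mem_cons.mp hk with rfl | hk'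
        · exact ⟨c, List.mem_cons_self, hcountc⟩
        · rcases (ih hpd).mp hk' with ⟨x, hxmem, hxcnt⟩
          refine ⟨x, List.mem_cons_of_mem _ (hdropSub.mem hxmem), ?_⟩
          rw [hcount_ne x (hdropne x hxmem), hxcnt]
      · rintro ⟨x, hxmem, hxcnt⟩
        by_cases hxc : x = c
        · subst hxc
          rw [hcountc] at hxcnt
          exact List.mem_cons.mpr (Or.inl hxcnt.symm)
        · have hxt : x ∈ t := by
            rcases List.mem_cons.mp hxmem with rfl | h
            · exact absurd rfl hxc
            · exact h
          have hxdrop : x ∈ t.dropWhile (· = c) := by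
            rw [← hsplit] at hxt
            rcases List.mem_append.mp hxt with h | h
            · exact absurd (htake x h) hxc
            · exact h
          refine List.mem_cons.mpr (Or.inr ((ih hpd).mpr ⟨x, hxdrop, ?_⟩))
          rw [← hcount_ne x hxc, hxcnt]

-- per-line agreement of the two membership tests
theorem line_test_eq (line : String) (n : Nat) :
    pvScanCount line.toList n line.toList =
      decide (n ∈ PySem.Set.ofList
        (pvRunLens (PySem.List.sorted line.toList (fun x => x) false))) := by
  set l := line.toList
  set s := PySem.List.sorted l (fun x => x) false with hsdef
  have hperm : s.Perm l := PySem.List.sorted_perm l (fun x => x) false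
  have hpair : s.Pairwise (· ≤ ·) := by
    simpa using PySem.List.sorted_pairwise l (fun x => x)
  have hmem : n ∈ pvRunLens s ↔ ∃ c ∈ l, l.count c = n := by
    rw [mem_pvRunLens_sorted s hpair n]
    constructor
    · rintro ⟨c, hc, hcnt⟩
      exact ⟨c, hperm.mem_iff.mp hc, by rw [← hperm.count_eq]; exact hcnt⟩
    · rintro ⟨c, hc, hcnt⟩
      exact ⟨c, hperm.mem_iff.mpr hc, by rw [hperm.count_eq]; exact hcnt⟩
  rw [pvScanCount_eq_any]
  by_cases h : ∃ c ∈ l, l.count c = n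
  · have : l.any (fun c => l.count c == n) = true := by
      rcases h with ⟨c, hc, hcnt⟩
      exact List.any_eq_true.mpr ⟨c, hc, by simp [hcnt]⟩
    rw [this]
    have : n ∈ PySem.Set.ofList (pvRunLens s) := by
      rw [PySem.Set.mem_ofList]; exact hmem.mpr h
    simp [this]
  · have : l.any (fun c => l.count c == n) = false := by
      simp only [List.any_eq_false]
      intro c hc
      simp only [beq_iff_eq]
      exact fun hcnt => h ⟨c, hc, hcnt⟩
    rw [this]
    have : n ∉ PySem.Set.ofList (pvRunLens s) := by
      rw [PySem.Set.mem_ofList]; exact fun hx => h (hmem.mp hx)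
    simp [this]

-- the two folds agree from any accumulator
theorem fold_eq (data : List String) : ∀ acc : Int × Int,
    data.foldl (fun (st : Int × Int) line =>
      let letters := line.toList
      let d := if pvScanCount letters 2 letters then st.1 + 1 else st.1
      let t := if pvScanCount letters 3 letters then st.2 + 1 else st.2
      (d, t)) acc
    = data.foldl (fun (st : Int × Int) line =>
      let s := PySem.List.sorted line.toList (fun x => x) false
      let lengths := PySem.Set.ofList (pvRunLens s)
      (st.1 + (if 2 ∈ lengths then 1 else 0), st.2 + (if 3 ∈ lengths then 1 else 0))) acc := by
  induction data with
  | nil => intro acc; rfl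
  | cons line rest ih =>
      intro acc
      simp only [List.foldl_cons]
      rw [ih]
      congr 1
      have h2 := line_test_eq line 2
      have h3 := line_test_eq line 3
      by_cases m2 : 2 ∈ PySem.Set.ofList (pvRunLens (PySem.List.sorted line.toList (fun x => x) false)) <;>
        by_cases m3 : 3 ∈ PySem.Set.ofList (pvRunLens (PySem.List.sorted line.toList (fun x => x) false)) <;>
        simp [m2, m3] at h2 h3 ⊢ <;> simp [h2, h3]

-- ===== VERDICT (by name: the statement is the Claim_ definition above) =====
theorem part1_spec : Claim_equal_part1 := by
  intro data _
  unfold Spec_part1 part1 part1_alt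
  rw [fold_eq]
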